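-- pv_equiv track=rewrite | github.com/Ricaym/group4-py-app | app/logic/condorcet.py | condorcet_winner
-- ===== SOURCE A (Python) =====
-- def condorcet_winner(rankings, candidates):
--     """
--     rankings: list of lists, each sublist is a ranking e.g. [3,1,2]
--     candidates: list of candidate ids
--     Returns pairwise matrix and winner id (or None)
--     """
--     wins = {a: {b:0 for b in candidates if b!=a} for a in candidates}
--     for r in rankings:
--         for i, a in enumerate(r):
--             for b in r[i+1:]:
--                 wins[a][b] += 1
--
--     for a in candidates:
--         beats_all = True
--         for b in candidates:
--             if a==b: continue
--             if wins[a].get(b,0) <= wins[b].get(a,0):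
--                 beats_all = False
--                 break
--         if beats_all:
--             return a, wins
--     return None, wins
-- ===== SOURCE B (Python) =====
-- def condorcet_winner(rankings, candidates):
--     cs = list(dict.fromkeys(candidates))
--     positions = [{c: i for i, c in enumerate(r)} for r in rankings]
--
--     def cnt(a, b):
--         n = 0
--         for pos in positions:
--             pa = pos.get(a)
--             pb = pos.get(b)
--             if pa is not None and pb is not None and pa < pb:
--                 n += 1
--         return n
--
--     wins = {a: {b: cnt(a, b) for b in cs if b != a} for a in cs}
--     if not cs:
--         return None, wins
--     champ = cs[0]
--     for b in cs[1:]: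
--         if wins[champ].get(b, 0) <= wins[b].get(champ, 0):
--             champ = b
--     for b in cs:
--         if b != champ and wins[champ].get(b, 0) <= wins[b].get(champ, 0):
--             return None, wins
--     return champ, wins
-- ===== Notes on version B (the rewrite author's own statement) =====
-- stated objective: alternative
-- what changed: B replaces A's triple loop of in-place matrix increments by a per-ranking position index (dict) with the matrix computed entry-by-entry as a count, and replaces A's first-that-beats-all scan by a single candidate-elimination sweep followed by one verification pass.
import Mathlib
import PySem

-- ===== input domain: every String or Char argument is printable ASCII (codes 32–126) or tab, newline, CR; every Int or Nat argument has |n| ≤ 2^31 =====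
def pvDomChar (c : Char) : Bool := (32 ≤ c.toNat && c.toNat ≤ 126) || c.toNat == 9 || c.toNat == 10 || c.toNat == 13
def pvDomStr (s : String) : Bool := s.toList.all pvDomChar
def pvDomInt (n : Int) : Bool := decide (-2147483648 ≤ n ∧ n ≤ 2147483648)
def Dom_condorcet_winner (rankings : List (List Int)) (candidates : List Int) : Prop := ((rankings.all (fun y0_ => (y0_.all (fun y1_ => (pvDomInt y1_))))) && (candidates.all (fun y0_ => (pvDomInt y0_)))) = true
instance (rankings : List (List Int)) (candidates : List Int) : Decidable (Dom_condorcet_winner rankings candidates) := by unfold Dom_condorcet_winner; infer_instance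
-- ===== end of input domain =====

-- B replaces A's in-place pairwise increment loop by per-ranking position dicts with the
-- matrix computed entry-by-entry as a count, and A's first-that-beats-all scan by a
-- candidate-elimination sweep plus one verification pass (objective: alternative).

-- ===== PORT A =====
-- wins[a][b] += 1  (on Pre_ both keys are always present, so Python's mandatory lookup
-- agrees with modify with a default)
def pvBumpA (w : PySem.Dict Int (PySem.Dict Int Int)) (a b : Int) :
    PySem.Dict Int (PySem.Dict Int Int) :=
  w.modify a PySem.Dict.empty (fun di => di.modify b 0 (· + 1))

def condorcet_winner (rankings : List (List Int)) (candidates : List Int) :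
    Option Int × (List (Int × List (Int × Int))) :=
  -- wins = {a: {b: 0 for b in candidates if b != a} for a in candidates}
  let wins0 : PySem.Dict Int (PySem.Dict Int Int) :=
    candidates.foldl (fun d a =>
      d.insert a (candidates.foldl (fun di b => if b ≠ a then di.insert b 0 else di)
        PySem.Dict.empty)) PySem.Dict.empty
  -- for r in rankings: for i, a in enumerate(r): for b in r[i+1:]: wins[a][b] += 1
  let wins : PySem.Dict Int (PySem.Dict Int Int) :=
    rankings.foldl (fun w r =>
      (PySem.List.enumerate r).foldl (fun w ia =>
        (PySem.List.slice r (some (ia.1 + 1)) none).foldl (fun w b => pvBumpA w ia.2 b) w) w)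
      wins0
  -- outer for-loop returning the first a whose flag loop (beats_all with break) survives;
  -- wins[a] / wins[b] are mandatory lookups, present on Pre_ (getD with empty default)
  let winner : Option Int :=
    candidates.find? (fun a => candidates.all (fun b =>
      a == b || decide ((wins.getD b PySem.Dict.empty).getD a 0 <
                        (wins.getD a PySem.Dict.empty).getD b 0)))
  (winner, wins.items.map (fun p => (p.1, p.2.items)))

-- ===== PORT B =====
-- pos = {c: i for i, c in enumerate(r)}
def pvPosDict (r : List Int) : PySem.Dict Int Int :=
  (PySem.List.enumerate r).foldl (fun d p => d.insert p.2 p.1) PySem.Dict.empty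

-- cnt(a, b): count rankings placing a strictly before b
def pvCnt (positions : List (PySem.Dict Int Int)) (a b : Int) : Int :=
  positions.foldl (fun n pos =>
    match pos.get? a, pos.get? b with
    | some pa, some pb => if pa < pb then n + 1 else n
    | _, _ => n) 0

def condorcet_winner_alt (rankings : List (List Int)) (candidates : List Int) :
    Option Int × (List (Int × List (Int × Int))) :=
  let cs : List Int := PySem.List.dedup candidates
  let positions : List (PySem.Dict Int Int) := rankings.map pvPosDict
  let wins : PySem.Dict Int (PySem.Dict Int Int) :=
    cs.foldl (fun d a =>
      d.insert a (cs.foldl (fun di b => if b ≠ a then di.insert b (pvCnt positions a b) else di)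
        PySem.Dict.empty)) PySem.Dict.empty
  let out := wins.items.map (fun p => (p.1, p.2.items))
  match cs with
  | [] => (none, out)
  | c0 :: rest =>
    let champ := rest.foldl (fun ch b =>
      if (wins.getD ch PySem.Dict.empty).getD b 0 ≤ (wins.getD b PySem.Dict.empty).getD ch 0
      then b else ch) c0
    if cs.all (fun b => b == champ ||
        decide ((wins.getD b PySem.Dict.empty).getD champ 0 <
                (wins.getD champ PySem.Dict.empty).getD b 0))
    then (some champ, out) else (none, out)

-- ===== PRECONDITION & SPEC =====
-- Pre_ excludes exactly the inputs where Python A raises KeyError: a ranking of length ≥ 2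
-- that repeats an element or contains an element outside candidates.
def Pre_condorcet_winner (rankings : List (List Int)) (candidates : List Int) : Prop :=
  ∀ r ∈ rankings, 2 ≤ r.length → r.Nodup ∧ ∀ x ∈ r, x ∈ candidates
instance (rankings : List (List Int)) (candidates : List Int) :
    Decidable (Pre_condorcet_winner rankings candidates) := by
  unfold Pre_condorcet_winner; infer_instance

def pvWitness_condorcet_winner : List (List Int) × List Int := ([[1, 2], [2, 1], [1, 2]], [1, 2])

def Spec_condorcet_winner (rankings : List (List Int)) (candidates : List Int)
    (out : Option Int × (List (Int × List (Int × Int)))) : Prop :=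
  out = condorcet_winner_alt rankings candidates
instance (rankings : List (List Int)) (candidates : List Int)
    (out : Option Int × (List (Int × List (Int × Int)))) :
    Decidable (Spec_condorcet_winner rankings candidates out) := by
  unfold Spec_condorcet_winner; infer_instance

-- ===== CLAIM (what is proved, stated in full; the proofs are below) =====
def Claim_equal_condorcet_winner : Prop := ∀ (rankings : List (List Int)) (candidates : List Int), Dom_condorcet_winner rankings candidates → Pre_condorcet_winner rankings candidates → Spec_condorcet_winner rankings candidates (condorcet_winner rankings candidates)

-- ===== LEMMAS AND PROOFS =====

-- the list of ordered pairs A's triple loop walks for one ranking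
def pvPairs (r : List Int) : List (Int × Int) :=
  (PySem.List.enumerate r).flatMap (fun ia =>
    (PySem.List.slice r (some (ia.1 + 1)) none).map (fun b => (ia.2, b)))

-- recursive form of pvPairs
def pvPairsL : List Int → List (Int × Int)
  | [] => []
  | x :: r => r.map (fun y => (x, y)) ++ pvPairsL r

-- the flat list of all increment operations of A's triple loop
def pvOps (rankings : List (List Int)) : List (Int × Int) := rankings.flatMap pvPairs

-- per-ranking indicator of B: a placed strictly before b
def pvInd (pos : PySem.Dict Int Int) (a b : Int) : Int :=
  match pos.get? a, pos.get? b with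
  | some pa, some pb => if pa < pb then 1 else 0
  | _, _ => 0

lemma pv_enumerate_shift (r : List Int) (s t : Int) :
    PySem.List.enumerate r (s + t) = (PySem.List.enumerate r s).map (fun p => (p.1 + t, p.2)) := by
  induction r generalizing s with
  | nil => simp [PySem.List.enumerate_nil]
  | cons x r ih =>
      simp only [PySem.List.enumerate_cons, List.map_cons]
      rw [show s + t + 1 = s + 1 + t by ring, ih]

lemma pv_pairs_eq_pairsL (r : List Int) : pvPairs r = pvPairsL r := by
  induction r with
  | nil => simp [pvPairs, pvPairsL, PySem.List.enumerate_nil]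
  | cons x r ih =>
      rw [pvPairsL, ← ih]
      simp only [pvPairs, PySem.List.enumerate_cons, List.flatMap_cons]
      congr 1
      · rw [PySem.List.slice_from _ (by norm_num)]
        norm_num
      · rw [pv_enumerate_shift r 0 1, List.flatMap_map]
        refine List.flatMap_congr (fun ia hia => ?_)
        rcases (PySem.List.mem_enumerate_iff r 0 ia).mp hia with ⟨k, hk, rfl⟩
        show List.map _ (PySem.List.slice (x :: r) (some (0 + (k:Int) + 1 + 1))) = _
        rw [PySem.List.slice_from _ (by positivity), PySem.List.slice_from _ (by positivity)]
        rw [show ((0:Int) + (k:Int) + 1 + 1).toNat = k + 2 by omega,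
            show ((0:Int) + (k:Int) + 1).toNat = k + 1 by omega]
        rfl

lemma pv_mem_pairsL {r : List Int} {p : Int × Int} (h : p ∈ pvPairsL r) :
    p.1 ∈ r ∧ p.2 ∈ r := by
  induction r with
  | nil => simp [pvPairsL] at h
  | cons x r ih =>
      simp only [pvPairsL, List.mem_append, List.mem_map] at h
      rcases h with ⟨y, hy, rfl⟩ | h
      · exact ⟨by simp, by simp [hy]⟩
      · rcases ih h with ⟨h1, h2⟩
        exact ⟨by simp [h1], by simp [h2]⟩

lemma pv_ne_pairsL {r : List Int} (hnd : r.Nodup) {p : Int × Int} (h : p ∈ pvPairsL r) :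
    p.1 ≠ p.2 := by
  induction r with
  | nil => simp [pvPairsL] at h
  | cons x r ih =>
      simp only [pvPairsL, List.mem_append, List.mem_map] at h
      rcases h with ⟨y, hy, rfl⟩ | h
      · intro he
        simp only at he
        exact (List.nodup_cons.mp hnd).1 (he ▸ hy)
      · exact ih (List.nodup_cons.mp hnd).2 h

lemma pv_winsA_eq_ops (rankings : List (List Int)) (w0 : PySem.Dict Int (PySem.Dict Int Int)) :
    rankings.foldl (fun w r =>
      (PySem.List.enumerate r).foldl (fun w ia =>
        (PySem.List.slice r (some (ia.1 + 1)) none).foldl (fun w b => pvBumpA w ia.2 b) w) w) w0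
    = (pvOps rankings).foldl (fun w p => pvBumpA w p.1 p.2) w0 := by
  simp [pvOps, pvPairs, List.foldl_flatMap, List.foldl_map]

-- inner dict of the bump fold at key a
lemma pv_getD_bump_dict (a : Int) (ops : List (Int × Int)) :
    ∀ w : PySem.Dict Int (PySem.Dict Int Int),
    ((ops.foldl (fun w p => pvBumpA w p.1 p.2) w).getD a PySem.Dict.empty)
      = ((ops.filter (fun p => p.1 == a)).map (fun p => p.2)).foldl
          (fun di b => di.modify b 0 (· + 1)) (w.getD a PySem.Dict.empty) := by
  induction ops with
  | nil => intro w; rfl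
  | cons p ops ih =>
      intro w
      simp only [List.foldl_cons, ih, List.filter_cons]
      by_cases h : p.1 = a
      · simp only [h, beq_self_eq_true, if_pos, List.map_cons, List.foldl_cons]
        congr 1
        simp [pvBumpA, PySem.Dict.getD_modify, h]
      · have : (p.1 == a) = false := by simp [h]
        simp only [this, Bool.false_eq_true, reduceIte]
        congr 1
        simp [pvBumpA, PySem.Dict.getD_modify, h, Ne.symm h]

-- getD through a fold of inserts whose value depends only on the key
lemma pv_getD_foldl_insert_pure {ν : Type} (v : Int → ν) (dflt : ν) (l : List Int) :
    ∀ (d : PySem.Dict Int ν) (a : Int),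
    (l.foldl (fun d x => d.insert x (v x)) d).getD a dflt
      = if a ∈ l then v a else d.getD a dflt := by
  induction l with
  | nil => simp
  | cons x l ih =>
      intro d a
      simp only [List.foldl_cons, ih, PySem.Dict.getD_insert, List.mem_cons]
      by_cases h : a ∈ l <;> by_cases h2 : a = x <;> simp [h, h2]

lemma pv_set_update_eq_self (l : List Int) :
    ∀ s : PySem.Set Int, (∀ x ∈ l, x ∈ s) → PySem.Set.update s l = s := by
  induction l with
  | nil => intro s _; rfl
  | cons x l ih =>
      intro s h
      have hx : PySem.Set.add s x = s := by
        have hc : PySem.Set.contains s x = true := by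
          simp only [PySem.Set.contains, List.contains_iff_mem]
          exact h x (by simp)
        simp only [PySem.Set.add, hc, if_pos]
      show PySem.Set.update (PySem.Set.add s x) l = s
      rw [hx]
      exact ih s (fun y hy => h y (by simp [hy]))

lemma pv_ofList_append_singleton (l : List Int) (x : Int) :
    PySem.Set.ofList (l ++ [x]) = PySem.Set.add (PySem.Set.ofList l) x := by
  simp [PySem.Set.ofList, List.foldl_append]

lemma pv_add_of_mem {s : PySem.Set Int} {x : Int} (h : x ∈ s) : PySem.Set.add s x = s := by
  simp [PySem.Set.add, PySem.Set.contains, List.contains_iff_mem, h]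

lemma pv_add_of_not_mem {s : PySem.Set Int} {x : Int} (h : x ∉ s) :
    PySem.Set.add s x = s ++ [x] := by
  simp [PySem.Set.add, PySem.Set.contains, List.contains_iff_mem, h]

lemma pv_ofList_filter (p : Int → Bool) (l : List Int) :
    PySem.Set.ofList (l.filter p) = (PySem.Set.ofList l).filter p := by
  induction l using List.reverseRecOn with
  | nil => rfl
  | append_singleton l x ih =>
      rw [List.filter_append, pv_ofList_append_singleton]
      by_cases hp : p x = true
      · rw [show List.filter p [x] = [x] by simp [hp], pv_ofList_append_singleton]
        by_cases hm : x ∈ l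
        · rw [pv_add_of_mem (by simp [PySem.Set.mem_ofList, List.mem_filter, hm, hp]),
              pv_add_of_mem (by simp [PySem.Set.mem_ofList, hm]), ih]
        · rw [pv_add_of_not_mem (by simp [PySem.Set.mem_ofList, List.mem_filter, hm]),
              pv_add_of_not_mem (by simp [PySem.Set.mem_ofList, hm]), ih, List.filter_append]
          simp [hp]
      · rw [show List.filter p [x] = [] by simp [hp], List.append_nil, ih]
        by_cases hm : x ∈ l
        · rw [pv_add_of_mem (by simp [PySem.Set.mem_ofList, hm])]
        · rw [pv_add_of_not_mem (by simp [PySem.Set.mem_ofList, hm]), List.filter_append]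
          simp [hp]

lemma pv_ofList_idem (l : List Int) :
    PySem.Set.ofList (PySem.Set.ofList l) = PySem.Set.ofList l := by
  induction l using List.reverseRecOn with
  | nil => rfl
  | append_singleton l x ih =>
      rw [pv_ofList_append_singleton]
      by_cases hm : x ∈ l
      · rw [pv_add_of_mem (by simp [PySem.Set.mem_ofList, hm]), ih]
      · rw [pv_add_of_not_mem (by simp [PySem.Set.mem_ofList, hm]),
            pv_ofList_append_singleton, ih,
            pv_add_of_not_mem (by simp [PySem.Set.mem_ofList, hm])]

lemma pv_posDict_aux (r : List Int) (c : Int) :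
    ∀ (s : Int) (d : PySem.Dict Int Int), r.Nodup →
    ((PySem.List.enumerate r s).foldl (fun d p => d.insert p.2 p.1) d).get? c
      = if c ∈ r then some (s + (r.idxOf c : Int)) else d.get? c := by
  induction r with
  | nil => intro s d _; simp [PySem.List.enumerate_nil]
  | cons x r ih =>
      intro s d hnd
      rw [PySem.List.enumerate_cons, List.foldl_cons,
          ih (s + 1) (d.insert x s) (hnd.of_cons)]
      by_cases hm : c ∈ r
      · have hcx : c ≠ x := fun h => (List.nodup_cons.mp hnd).1 (h ▸ hm)
        rw [if_pos hm, if_pos (by simp [hm]), List.idxOf_cons_ne _ (Ne.symm hcx)]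
        congr 1
        push_cast [Nat.succ_eq_add_one]
        ring
      · rw [if_neg hm, PySem.Dict.get?_insert]
        by_cases hcx : c = x
        · rw [if_pos hcx, if_pos (by simp [hcx]), hcx, List.idxOf_cons_self]
          simp
        · rw [if_neg hcx, if_neg (by simp [hcx, hm])]

lemma pv_posDict_get? (r : List Int) (h : r.Nodup) (c : Int) :
    (pvPosDict r).get? c = if c ∈ r then some ((r.idxOf c : Int)) else none := by
  rw [pvPosDict, pv_posDict_aux r c 0 PySem.Dict.empty h]
  simp [PySem.Dict.get?_empty]

lemma pv_count_pairsL (a b : Int) (hab : a ≠ b) :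
    ∀ r : List Int, r.Nodup →
    (pvPairsL r).count (a, b)
      = if a ∈ r ∧ b ∈ r ∧ r.idxOf a < r.idxOf b then 1 else 0 := by
  intro r
  induction r with
  | nil => simp [pvPairsL]
  | cons x r ih =>
      intro hnd
      have hxr : x ∉ r := (List.nodup_cons.mp hnd).1
      have hndr : r.Nodup := (List.nodup_cons.mp hnd).2
      rw [pvPairsL, List.count_append]
      have hmap : (r.map (fun y => (x, y))).count (a, b)
          = if x = a then r.count b else 0 := by
        by_cases hxa : x = a
        · subst hxa
          rw [if_pos rfl]
          simp only [List.count, List.countP_map]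
          congr 1
          funext y
          simp [Prod.ext_iff]
        · rw [if_neg hxa, List.count_eq_zero]
          simp only [List.mem_map, not_exists]
          rintro y ⟨hy, he⟩
          exact hxa (congrArg Prod.fst he)
      by_cases hxa : x = a
      · subst hxa
        have hpz : (pvPairsL r).count (x, b) = 0 := by
          rw [List.count_eq_zero]
          intro hmem
          exact hxr (pv_mem_pairsL hmem).1
        rw [hmap, if_pos rfl, hpz, Nat.add_zero]
        by_cases hb : b ∈ r
        · rw [if_pos ⟨List.mem_cons_self, List.mem_cons_of_mem _ hb, by
            rw [List.idxOf_cons_self, List.idxOf_cons_ne _ hab]; omega⟩]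
          exact List.count_eq_one_of_mem hndr hb
        · rw [if_neg (by
            rintro ⟨-, hbm, -⟩
            rcases List.mem_cons.mp hbm with h | h
            · exact hab h.symm
            · exact hb h)]
          exact List.count_eq_zero.mpr hb
      · rw [hmap, if_neg hxa, Nat.zero_add, ih hndr]
        by_cases hbx : b = x
        · subst hbx
          rw [if_neg (by rintro ⟨-, hbm, -⟩; exact hxr hbm),
              if_neg (by
                rintro ⟨ham, -, hlt⟩
                rcases List.mem_cons.mp ham with h | h
                · exact hxa h.symm
                · rw [List.idxOf_cons_self, List.idxOf_cons_ne _ hxa] at hlt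
                  omega)]
        · have hiff : (a ∈ r ∧ b ∈ r ∧ r.idxOf a < r.idxOf b)
              ↔ (a ∈ x :: r ∧ b ∈ x :: r ∧ (x :: r).idxOf a < (x :: r).idxOf b) := by
            rw [List.idxOf_cons_ne _ hxa, List.idxOf_cons_ne _ (Ne.symm hbx)]
            constructor
            · rintro ⟨h1, h2, h3⟩
              exact ⟨List.mem_cons_of_mem _ h1, List.mem_cons_of_mem _ h2, by omega⟩
            · rintro ⟨h1, h2, h3⟩
              refine ⟨?_, ?_, by omega⟩
              · rcases List.mem_cons.mp h1 with h | h
                · exact absurd h.symm hxa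
                · exact h
              · rcases List.mem_cons.mp h2 with h | h
                · exact absurd h hbx
                · exact h
          rw [if_congr hiff rfl rfl]

-- the per-ranking count of A's pair walk equals B's position indicator
lemma pv_pairs_count_eq_ind (r : List Int) (hnd : r.Nodup) (a b : Int) (hab : a ≠ b) :
    ((pvPairs r).count (a, b) : Int) = pvInd (pvPosDict r) a b := by
  rw [pv_pairs_eq_pairsL, pv_count_pairsL a b hab r hnd, pvInd,
      pv_posDict_get? r hnd a, pv_posDict_get? r hnd b]
  by_cases ha : a ∈ r <;> by_cases hb : b ∈ r <;>
    simp [ha, hb] <;> omega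

-- B's cnt loop as a sum of per-ranking indicators
lemma pv_cnt_eq_sum (positions : List (PySem.Dict Int Int)) (a b : Int) :
    pvCnt positions a b = (positions.map (fun pos => pvInd pos a b)).sum := by
  rw [pvCnt]
  rw [PySem.List.foldl_congr_mem positions _ (fun n pos => n + pvInd pos a b) 0 (by
    intro n pos _
    unfold pvInd
    cases ha : pos.get? a <;> cases hb : pos.get? b <;> simp [ha, hb] <;> split_ifs <;> simp)]
  rw [PySem.List.foldl_add]
  simp

-- count of (a, b) among A's operations equals B's cnt
lemma pv_ops_count_eq_cnt (rankings : List (List Int))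
    (hnd : ∀ r ∈ rankings, r.Nodup) (a b : Int) (hab : a ≠ b) :
    ((pvOps rankings).count (a, b) : Int) = pvCnt (rankings.map pvPosDict) a b := by
  rw [pvOps, List.count_flatMap, pv_cnt_eq_sum, List.map_map, Nat.cast_list_sum, List.map_map]
  congr 1
  refine List.map_congr_left (fun r hr => ?_)
  exact pv_pairs_count_eq_ind r (hnd r hr) a b hab

lemma pv_sweep_winner (wv : Int → Int → Int) (x : Int) :
    ∀ (rest : List Int) (ch : Int), ch ∉ rest → rest.Nodup → (x = ch ∨ x ∈ rest) →
    (∀ c, (c = ch ∨ c ∈ rest) → c ≠ x → wv c x < wv x c) →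
    rest.foldl (fun ch b => if wv ch b ≤ wv b ch then b else ch) ch = x := by
  intro rest
  induction rest with
  | nil =>
      intro ch _ _ hx _
      rcases hx with h | h
      · simpa using h.symm
      · simp at h
  | cons b rest ih =>
      intro ch hch hnd hx hbeat
      have hbr : b ∉ rest := (List.nodup_cons.mp hnd).1
      have hndr : rest.Nodup := (List.nodup_cons.mp hnd).2
      have hchb : ch ≠ b := fun h => hch (h ▸ List.mem_cons_self)
      have hchr : ch ∉ rest := fun h => hch (List.mem_cons_of_mem _ h)
      rw [List.foldl_cons]
      by_cases hxc : x = ch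
      · have hbx : b ≠ x := fun h => hchb (hxc ▸ h.symm ▸ rfl)
        have hlt : wv b x < wv x b := hbeat b (Or.inr List.mem_cons_self) hbx
        rw [if_neg (by rw [← hxc]; omega)]
        exact ih ch hchr hndr (Or.inl hxc)
          (fun c hc hcx => hbeat c (hc.imp id (List.mem_cons_of_mem _)) hcx)
      · rcases hx with h | h
        · exact absurd h hxc
        rcases List.mem_cons.mp h with hxb | hxr
        · subst hxb
          have hlt : wv ch x < wv x ch := hbeat ch (Or.inl rfl) (fun h => hxc h.symm)
          rw [if_pos (by omega)]
          exact ih x hbr hndr (Or.inl rfl)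
            (fun c hc hcx => hbeat c (by
              rcases hc with h | h
              · exact Or.inr (h ▸ List.mem_cons_self)
              · exact Or.inr (List.mem_cons_of_mem _ h)) hcx)
        · have hbx : b ≠ x := fun h => hbr (h ▸ hxr)
          have hstep : ∀ ch', ch' = b ∨ ch' = ch →
              rest.foldl (fun ch b => if wv ch b ≤ wv b ch then b else ch) ch' = x := by
            intro ch' hch'
            refine ih ch' ?_ hndr (Or.inr hxr) ?_
            · rcases hch' with h | h
              · exact h ▸ hbr
              · exact h ▸ hchr
            · intro c hc hcx
              refine hbeat c ?_ hcx
              rcases hc with h | h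
              · rcases hch' with h2 | h2
                · exact Or.inr (by rw [h, h2]; exact List.mem_cons_self)
                · exact Or.inl (h.trans h2)
              · exact Or.inr (List.mem_cons_of_mem _ h)
          by_cases hle : wv ch b ≤ wv b ch
          · rw [if_pos hle]
            exact hstep b (Or.inl rfl)
          · rw [if_neg hle]
            exact hstep ch (Or.inr rfl)

lemma pv_sweep_mem (wv : Int → Int → Int) :
    ∀ (rest : List Int) (ch : Int),
    rest.foldl (fun ch b => if wv ch b ≤ wv b ch then b else ch) ch ∈ ch :: rest := by
  intro rest
  induction rest with
  | nil => simp
  | cons b rest ih =>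
      intro ch
      simp only [List.foldl_cons]
      by_cases h : wv ch b ≤ wv b ch <;> simp only [h, if_pos, if_neg] <;>
        [rcases (List.mem_cons.mp (ih b)) with h2 | h2;
         rcases (List.mem_cons.mp (ih ch)) with h2 | h2] <;> simp [h, h2]

lemma pv_find?_unique (p : Int → Bool) (x : Int) :
    ∀ l : List Int, x ∈ l → p x = true → (∀ y ∈ l, p y = true → y = x) →
    l.find? p = some x := by
  intro l
  induction l with
  | nil => simp
  | cons y l ih =>
      intro hx hpx huni
      by_cases hpy : p y = true
      · have : y = x := huni y (by simp) hpy
        simp [List.find?_cons, this, hpx]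
      · have hxy : x ≠ y := fun h => hpy (h ▸ hpx)
        have hx' : x ∈ l := by
          rcases List.mem_cons.mp hx with h | h
          · exact absurd h hxy
          · exact h
        rw [List.find?_cons_of_neg hpy]
        exact ih hx' hpx (fun y hy hpy2 => huni y (by simp [hy]) hpy2)

lemma pv_count_snd_filter (ops : List (Int × Int)) (a b : Int) :
    ((ops.filter (fun p => p.1 == a)).map (fun p => p.2)).count b = ops.count (a, b) := by
  rw [List.count, List.count, List.countP_map, List.countP_filter]
  congr 1
  funext p
  cases p with
  | mk p1 p2 =>
      show (p2 == b && (p1 == a)) = ((p1, p2) == (a, b))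
      rw [Bool.eq_iff_iff]
      simp [and_comm]

-- named pieces of the two matrix builds
def pvInner0 (candidates : List Int) (a : Int) : PySem.Dict Int Int :=
  candidates.foldl (fun di b => if b ≠ a then di.insert b 0 else di) PySem.Dict.empty

def pvW0 (candidates : List Int) : PySem.Dict Int (PySem.Dict Int Int) :=
  candidates.foldl (fun d a => d.insert a (pvInner0 candidates a)) PySem.Dict.empty

def pvInnerB (rankings : List (List Int)) (candidates : List Int) (a : Int) :
    PySem.Dict Int Int :=
  (PySem.List.dedup candidates).foldl
    (fun di b => if b ≠ a then di.insert b (pvCnt (rankings.map pvPosDict) a b) else di)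
    PySem.Dict.empty

def pvWinsB (rankings : List (List Int)) (candidates : List Int) :
    PySem.Dict Int (PySem.Dict Int Int) :=
  (PySem.List.dedup candidates).foldl
    (fun d a => d.insert a (pvInnerB rankings candidates a)) PySem.Dict.empty

lemma pv_inner0_filter (candidates : List Int) (a : Int) :
    pvInner0 candidates a
      = (candidates.filter (fun b => decide (b ≠ a))).foldl (fun di b => di.insert b 0)
          PySem.Dict.empty :=
  PySem.List.foldl_ite_eq_foldl_filter _ _ _ _

lemma pv_innerB_filter (rankings : List (List Int)) (candidates : List Int) (a : Int) :
    pvInnerB rankings candidates a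
      = ((PySem.List.dedup candidates).filter (fun b => decide (b ≠ a))).foldl
          (fun di b => di.insert b (pvCnt (rankings.map pvPosDict) a b)) PySem.Dict.empty :=
  PySem.List.foldl_ite_eq_foldl_filter _ _ _ _

lemma pv_inner0_keys (candidates : List Int) (a : Int) :
    (pvInner0 candidates a).keys
      = PySem.Set.ofList (candidates.filter (fun b => decide (b ≠ a))) := by
  rw [pv_inner0_filter,
      PySem.Dict.keys_foldl_insert _ (fun _ _ => (0 : Int)) PySem.Dict.empty]
  rfl

lemma pv_inner0_getD (candidates : List Int) (a b : Int) :
    (pvInner0 candidates a).getD b 0 = 0 := by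
  rw [pv_inner0_filter, pv_getD_foldl_insert_pure (fun _ => (0 : Int))]
  split <;> simp

lemma pv_filter_keys_eq (candidates : List Int) (a : Int) :
    PySem.Set.ofList ((PySem.List.dedup candidates).filter (fun b => decide (b ≠ a)))
      = PySem.Set.ofList (candidates.filter (fun b => decide (b ≠ a))) := by
  rw [pv_ofList_filter, pv_ofList_filter]
  show (PySem.Set.ofList (PySem.Set.ofList candidates)).filter _ = _
  rw [pv_ofList_idem]

-- the inner dict at key a after A's increments equals B's inner dict
lemma pv_inner_eq (rankings : List (List Int)) (candidates : List Int) (a : Int)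
    (hnd : ∀ r ∈ rankings, r.Nodup)
    (hops : ∀ p ∈ pvOps rankings, p.1 ∈ candidates ∧ p.2 ∈ candidates ∧ p.1 ≠ p.2) :
    (((pvOps rankings).filter (fun p => p.1 == a)).map (fun p => p.2)).foldl
        (fun di b => di.modify b 0 (· + 1)) (pvInner0 candidates a)
      = pvInnerB rankings candidates a := by
  set bsA := ((pvOps rankings).filter (fun p => p.1 == a)).map (fun p => p.2) with hbsA
  have hbs : ∀ b ∈ bsA, b ∈ candidates ∧ b ≠ a := by
    intro b hb
    rw [hbsA, List.mem_map] at hb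
    obtain ⟨p, hp, rfl⟩ := hb
    rw [List.mem_filter] at hp
    have h1 := hops p hp.1
    have ha : p.1 = a := beq_iff_eq.mp hp.2
    exact ⟨h1.2.1, fun he => h1.2.2 (ha.trans he.symm)⟩
  have hkeysL : (bsA.foldl (fun di b => di.modify b 0 (· + 1)) (pvInner0 candidates a)).keys
      = PySem.Set.ofList (candidates.filter (fun b => decide (b ≠ a))) := by
    rw [PySem.Dict.keys_foldl_modify bsA 0 (fun _ _ => (· + 1)), pv_inner0_keys]
    refine pv_set_update_eq_self _ _ ?_
    intro b hb
    rw [PySem.Set.mem_ofList, List.mem_filter]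
    exact ⟨(hbs b hb).1, by simp [(hbs b hb).2]⟩
  have hkeysR : (pvInnerB rankings candidates a).keys
      = PySem.Set.ofList (candidates.filter (fun b => decide (b ≠ a))) := by
    rw [pv_innerB_filter,
        PySem.Dict.keys_foldl_insert _ (fun _ b => pvCnt (rankings.map pvPosDict) a b)
          PySem.Dict.empty]
    exact pv_filter_keys_eq candidates a
  have hndL : (bsA.foldl (fun di b => di.modify b 0 (· + 1)) (pvInner0 candidates a)).keys.Nodup := by
    rw [hkeysL]; exact PySem.Set.nodup_ofList _
  have hndR : (pvInnerB rankings candidates a).keys.Nodup := by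
    rw [hkeysR]; exact PySem.Set.nodup_ofList _
  apply PySem.Dict.ext
  rw [PySem.Dict.items_eq_map_keys _ hndL 0, PySem.Dict.items_eq_map_keys _ hndR 0,
      hkeysL, hkeysR]
  refine List.map_congr_left (fun b hb => ?_)
  rw [PySem.Set.mem_ofList, List.mem_filter] at hb
  have hba : b ≠ a := by simpa using hb.2
  congr 1
  rw [PySem.Dict.getD_foldl_modify_add_one, pv_inner0_getD, hbsA, pv_count_snd_filter,
      pv_innerB_filter, pv_getD_foldl_insert_pure]
  rw [if_pos (by
    rw [List.mem_filter]
    refine ⟨?_, by simp [hba]⟩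
    exact (PySem.Set.mem_ofList candidates b).mpr hb.1)]
  rw [zero_add]
  exact pv_ops_count_eq_cnt rankings hnd a b (Ne.symm hba)

-- the matrices of A and B coincide
lemma pv_wins_eq (rankings : List (List Int)) (candidates : List Int)
    (hnd : ∀ r ∈ rankings, r.Nodup)
    (hmem : ∀ r ∈ rankings, ∀ p ∈ pvPairsL r, p.1 ∈ candidates ∧ p.2 ∈ candidates) :
    (pvOps rankings).foldl (fun w p => pvBumpA w p.1 p.2) (pvW0 candidates)
      = pvWinsB rankings candidates := by
  have hops : ∀ p ∈ pvOps rankings, p.1 ∈ candidates ∧ p.2 ∈ candidates ∧ p.1 ≠ p.2 := by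
    intro p hp
    rw [pvOps, List.mem_flatMap] at hp
    obtain ⟨r, hr, hpr⟩ := hp
    rw [pv_pairs_eq_pairsL] at hpr
    exact ⟨(hmem r hr p hpr).1, (hmem r hr p hpr).2, pv_ne_pairsL (hnd r hr) hpr⟩
  have hkeysW0 : (pvW0 candidates).keys = PySem.Set.ofList candidates := by
    rw [pvW0, PySem.Dict.keys_foldl_insert _ (fun _ a => pvInner0 candidates a)]
    rfl
  have hkeysL : ((pvOps rankings).foldl (fun w p => pvBumpA w p.1 p.2) (pvW0 candidates)).keys
      = PySem.Set.ofList candidates := by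
    rw [show (fun (w : PySem.Dict Int (PySem.Dict Int Int)) (p : Int × Int) => pvBumpA w p.1 p.2)
          = (fun d x => d.modify ((fun p : Int × Int => p.1) x) PySem.Dict.empty
              ((fun (_ : PySem.Dict Int (PySem.Dict Int Int)) (p : Int × Int)
                  (di : PySem.Dict Int Int) => di.modify p.2 0 (· + 1)) d x)) from rfl,
        PySem.Dict.keys_foldl_modify_key, hkeysW0]
    refine pv_set_update_eq_self _ _ ?_
    intro x hx
    rw [List.mem_map] at hx
    obtain ⟨p, hp, rfl⟩ := hx
    exact (PySem.Set.mem_ofList _ _).mpr (hops p hp).1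
  have hkeysR : (pvWinsB rankings candidates).keys = PySem.Set.ofList candidates := by
    rw [pvWinsB, PySem.Dict.keys_foldl_insert _ (fun _ a => pvInnerB rankings candidates a)]
    show PySem.Set.ofList (PySem.Set.ofList candidates) = _
    exact pv_ofList_idem candidates
  have hndL : ((pvOps rankings).foldl (fun w p => pvBumpA w p.1 p.2) (pvW0 candidates)).keys.Nodup := by
    rw [hkeysL]; exact PySem.Set.nodup_ofList _
  have hndR : (pvWinsB rankings candidates).keys.Nodup := by
    rw [hkeysR]; exact PySem.Set.nodup_ofList _
  apply PySem.Dict.ext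
  rw [PySem.Dict.items_eq_map_keys _ hndL PySem.Dict.empty,
      PySem.Dict.items_eq_map_keys _ hndR PySem.Dict.empty, hkeysL, hkeysR]
  refine List.map_congr_left (fun a ha => ?_)
  have hac : a ∈ candidates := (PySem.Set.mem_ofList candidates a).mp ha
  congr 1
  rw [pv_getD_bump_dict]
  have hW0a : (pvW0 candidates).getD a PySem.Dict.empty = pvInner0 candidates a := by
    rw [pvW0, pv_getD_foldl_insert_pure (fun a => pvInner0 candidates a), if_pos hac]
  rw [hW0a]
  have hRa : (pvWinsB rankings candidates).getD a PySem.Dict.empty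
      = pvInnerB rankings candidates a := by
    rw [pvWinsB, pv_getD_foldl_insert_pure (fun a => pvInnerB rankings candidates a)]
    rw [if_pos (by
      show a ∈ PySem.Set.ofList candidates
      exact ha)]
  rw [hRa]
  exact pv_inner_eq rankings candidates a hnd hops

-- the winner searches of A and B coincide (wv is any fixed pairwise matrix lookup)
lemma pv_winner_eq (wv : Int → Int → Int) (candidates : List Int) :
    candidates.find? (fun a => candidates.all (fun b => a == b || decide (wv b a < wv a b)))
    = (match PySem.Set.ofList candidates with
       | [] => none
       | c0 :: rest =>
         let champ := rest.foldl (fun ch b => if wv ch b ≤ wv b ch then b else ch) c0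
         if (PySem.Set.ofList candidates).all
             (fun b => b == champ || decide (wv b champ < wv champ b))
         then some champ else none) := by
  have hmem : ∀ x : Int, x ∈ PySem.Set.ofList candidates ↔ x ∈ candidates :=
    fun x => PySem.Set.mem_ofList candidates x
  have hnd := PySem.Set.nodup_ofList candidates
  have hpiff : ∀ a, (candidates.all (fun b => a == b || decide (wv b a < wv a b)) = true)
      ↔ ∀ b ∈ candidates, b ≠ a → wv b a < wv a b := by
    intro a
    rw [List.all_eq_true]
    constructor
    · intro h b hb hne
      rcases Bool.or_eq_true_iff.mp (h b hb) with h2 | h2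
      · exact absurd (beq_iff_eq.mp h2).symm hne
      · exact of_decide_eq_true h2
    · intro h b hb
      by_cases he : a = b
      · simp [he]
      · simp only [Bool.or_eq_true_iff]
        exact Or.inr (decide_eq_true (h b hb (fun h2 => he h2.symm)))
  cases hcs : PySem.Set.ofList candidates with
  | nil =>
      have hempty : candidates = [] := by
        cases candidates with
        | nil => rfl
        | cons c cs =>
            exfalso
            have : c ∈ PySem.Set.ofList (c :: cs) := (hmem c).mpr (by simp)
            rw [hcs] at this
            simp at this
      simp [hempty]
  | cons c0 rest =>
      have hndc : c0 ∉ rest ∧ rest.Nodup := by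
        have := hcs ▸ hnd
        exact List.nodup_cons.mp this
      have hverify : ∀ ch, ((c0 :: rest).all (fun b => b == ch || decide (wv b ch < wv ch b)) = true)
          ↔ ∀ b ∈ candidates, b ≠ ch → wv b ch < wv ch b := by
        intro ch
        rw [List.all_eq_true]
        constructor
        · intro h b hb hne
          have hb2 : b ∈ c0 :: rest := hcs ▸ (hmem b).mpr hb
          rcases Bool.or_eq_true_iff.mp (h b hb2) with h2 | h2
          · exact absurd (beq_iff_eq.mp h2) hne
          · exact of_decide_eq_true h2
        · intro h b hb
          have hb2 : b ∈ candidates := (hmem b).mp (hcs ▸ hb)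
          by_cases he : b = ch
          · simp [he]
          · simp only [Bool.or_eq_true_iff]
            exact Or.inr (decide_eq_true (h b hb2 he))
      simp only [hcs]
      by_cases hex : ∃ x ∈ candidates,
          (candidates.all (fun b => x == b || decide (wv b x < wv x b))) = true
      · obtain ⟨x, hxmem, hpx⟩ := hex
        have hPx := (hpiff x).mp hpx
        have huni : ∀ y ∈ candidates,
            (candidates.all (fun b => y == b || decide (wv b y < wv y b))) = true → y = x := by
          intro y hy hpy
          by_contra hne
          have h1 := (hpiff y).mp hpy x hxmem (fun h => hne h.symm)
          have h2 := hPx y hy hne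
          omega
        rw [pv_find?_unique _ x candidates hxmem hpx huni]
        have hxcs : x ∈ c0 :: rest := hcs ▸ (hmem x).mpr hxmem
        have hchamp : rest.foldl (fun ch b => if wv ch b ≤ wv b ch then b else ch) c0 = x := by
          refine pv_sweep_winner wv x rest c0 hndc.1 hndc.2 ?_ ?_
          · rcases List.mem_cons.mp hxcs with h | h
            · exact Or.inl h
            · exact Or.inr h
          · intro c hc hcx
            have : c ∈ c0 :: rest := by
              rcases hc with h | h
              · exact h ▸ List.mem_cons_self
              · exact List.mem_cons_of_mem _ h
            exact hPx c ((hmem c).mp (hcs ▸ this)) hcx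
        simp only [hchamp]
        rw [if_pos ((hverify x).mpr hPx)]
      · push_neg at hex
        rw [List.find?_eq_none.mpr (fun y hy hpy => hex y hy hpy)]
        have hchmem : rest.foldl (fun ch b => if wv ch b ≤ wv b ch then b else ch) c0
            ∈ c0 :: rest := pv_sweep_mem wv rest c0
        set ch := rest.foldl (fun ch b => if wv ch b ≤ wv b ch then b else ch) c0 with hch
        have hchc : ch ∈ candidates := (hmem ch).mp (hcs ▸ hchmem)
        rw [if_neg (fun hall => hex ch hchc ((hpiff ch).mpr ((hverify ch).mp hall)))]

-- ===== VERDICT (by name: the statement is the Claim_ definition above) =====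
theorem condorcet_winner_spec : Claim_equal_condorcet_winner := by
  intro rankings candidates hdom hpre
  unfold Spec_condorcet_winner
  have hnd : ∀ r ∈ rankings, r.Nodup := by
    intro r hr
    by_cases h2 : 2 ≤ r.length
    · exact (hpre r hr h2).1
    · rcases r with _ | ⟨x, _ | ⟨y, t⟩⟩
      · simp
      · simp
      · exact absurd (by simp) h2
  have hmem : ∀ r ∈ rankings, ∀ p ∈ pvPairsL r, p.1 ∈ candidates ∧ p.2 ∈ candidates := by
    intro r hr p hp
    by_cases h2 : 2 ≤ r.length
    · have hsub := (hpre r hr h2).2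
      exact ⟨hsub _ (pv_mem_pairsL hp).1, hsub _ (pv_mem_pairsL hp).2⟩
    · exfalso
      rcases r with _ | ⟨x, _ | ⟨y, t⟩⟩
      · simp [pvPairsL] at hp
      · simp [pvPairsL] at hp
      · exact h2 (by simp)
  have hW : rankings.foldl (fun w r =>
        (PySem.List.enumerate r).foldl (fun w ia =>
          (PySem.List.slice r (some (ia.1 + 1)) none).foldl (fun w b => pvBumpA w ia.2 b) w) w)
        (pvW0 candidates)
      = pvWinsB rankings candidates := by
    rw [pv_winsA_eq_ops]
    exact pv_wins_eq rankings candidates hnd hmem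
  have hA : condorcet_winner rankings candidates
      = (candidates.find? (fun a => candidates.all (fun b => a == b ||
          decide (((rankings.foldl (fun w r =>
              (PySem.List.enumerate r).foldl (fun w ia =>
                (PySem.List.slice r (some (ia.1 + 1)) none).foldl
                  (fun w b => pvBumpA w ia.2 b) w) w) (pvW0 candidates)).getD b
                    PySem.Dict.empty).getD a 0 <
            ((rankings.foldl (fun w r =>
              (PySem.List.enumerate r).foldl (fun w ia =>
                (PySem.List.slice r (some (ia.1 + 1)) none).foldl
                  (fun w b => pvBumpA w ia.2 b) w) w) (pvW0 candidates)).getD a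
                    PySem.Dict.empty).getD b 0))),
         (rankings.foldl (fun w r =>
            (PySem.List.enumerate r).foldl (fun w ia =>
              (PySem.List.slice r (some (ia.1 + 1)) none).foldl
                (fun w b => pvBumpA w ia.2 b) w) w) (pvW0 candidates)).items.map
           (fun p => (p.1, p.2.items))) := rfl
  have hB : condorcet_winner_alt rankings candidates
      = ((match PySem.List.dedup candidates with
          | [] => (none, (pvWinsB rankings candidates).items.map (fun p => (p.1, p.2.items)))
          | c0 :: rest =>
            if (PySem.List.dedup candidates).all (fun b =>
                b == (rest.foldl (fun ch b =>
                    if ((pvWinsB rankings candidates).getD ch PySem.Dict.empty).getD b 0 ≤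
                       ((pvWinsB rankings candidates).getD b PySem.Dict.empty).getD ch 0
                    then b else ch) c0) ||
                decide (((pvWinsB rankings candidates).getD b PySem.Dict.empty).getD
                    (rest.foldl (fun ch b =>
                      if ((pvWinsB rankings candidates).getD ch PySem.Dict.empty).getD b 0 ≤
                         ((pvWinsB rankings candidates).getD b PySem.Dict.empty).getD ch 0
                      then b else ch) c0) 0 <
                  ((pvWinsB rankings candidates).getD
                      (rest.foldl (fun ch b =>
                        if ((pvWinsB rankings candidates).getD ch PySem.Dict.empty).getD b 0 ≤
                           ((pvWinsB rankings candidates).getD b PySem.Dict.empty).getD ch 0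
                        then b else ch) c0) PySem.Dict.empty).getD b 0))
            then (some (rest.foldl (fun ch b =>
                    if ((pvWinsB rankings candidates).getD ch PySem.Dict.empty).getD b 0 ≤
                       ((pvWinsB rankings candidates).getD b PySem.Dict.empty).getD ch 0
                    then b else ch) c0),
                  (pvWinsB rankings candidates).items.map (fun p => (p.1, p.2.items)))
            else (none, (pvWinsB rankings candidates).items.map (fun p => (p.1, p.2.items)))) :
          Option Int × (List (Int × List (Int × Int)))) := rfl
  rw [hA, hB, hW]
  have hw := pv_winner_eq
    (fun x y => ((pvWinsB rankings candidates).getD x PySem.Dict.empty).getD y 0) candidates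
  simp only [] at hw
  rw [hw, show PySem.Set.ofList candidates = PySem.List.dedup candidates from rfl]
  rcases hdc : PySem.List.dedup candidates with _ | ⟨c0, rest⟩
  · rfl
  · simp only []
    split_ifs <;> rfl
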